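-- pv_equiv track=rewrite | github.com/SilasK/StrainGE | src/strainge/variant_caller.py | count_ts_tv
-- ===== SOURCE A (Python) =====
-- from enum import IntFlag, auto
--
-- class Allele(IntFlag):
--     """Enum for possible alleles at a position. Derives from `enum.IntFlag` so
--     values can be combined like this:
--
--     >>> Allele.A | Allele.T
--     <Allele.A|T: 9>
--
--     This is useful to indicate that multiple alleles are present at a given
--     genomic location.
--     """
--
--     N = 0
--     A = auto()
--     C = auto()
--     G = auto()
--     T = auto()
--     INS = auto()
--     DEL = auto()
--
--     @classmethod
--     def from_str(cls, base):
--         """Create a new `Allele` object from a single character string."""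
--
--         if base not in cls.__members__:
--             return Allele.N
--
--         return cls.__members__[base]
--
--     def rc(self):
--         """Return reverse-complement allele; only valid for single-allele
--         values"""
--         if self.value == Allele.A:
--             return Allele.T
--         if self.value == Allele.C:
--             return Allele.G
--         if self.value == Allele.G:
--             return Allele.C
--         if self.value == Allele.T:
--             return Allele.A
--         return self
--
--     def __iter__(self):
--         for allele in Allele:
--             if self.value & allele:
--                 yield allele
--
--     def __str__(self):
--         alleles = list(self)
--         if len(alleles) == 1:
--             return _allele_to_str(alleles[0])
--         else:
--             return ",".join(str(v) for v in self)
--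
-- def count_ts_tv(array1, array2):
--     """Count number of transitions and transversions in an Allele array."""
--
--     assert len(array1) == len(array2)
--
--     transition_pairs = frozenset([
--         (Allele.A, Allele.G),
--         (Allele.G, Allele.A),
--         (Allele.C, Allele.T),
--         (Allele.T, Allele.C)
--     ])
--
--     transitions = 0
--     transversions = 0
--     for pair in zip(array1, array2):
--         if pair in transition_pairs:
--             transitions += 1
--         else:
--             transversions += 1
--
--     return transitions, transversions
-- ===== SOURCE B (Python) =====
-- def count_ts_tv(array1, array2):
--     """Count number of transitions and transversions in an Allele array.
--
--     Tally every distinct allele pair once in a counting dict, then read off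
--     the four transition pairs; transversions = total - transitions.
--     Allele int values: A=1, C=2, G=4, T=8 (IntFlag compares equal to int).
--     """
--     assert len(array1) == len(array2)
--
--     counts = {}
--     for pair in zip(array1, array2):
--         counts[pair] = counts.get(pair, 0) + 1
--
--     transitions = sum(counts.get(p, 0) for p in ((1, 4), (4, 1), (2, 8), (8, 2)))
--     return transitions, len(array1) - transitions
-- ===== Notes on version B (the rewrite author's own statement) =====
-- stated objective: alternative
-- what changed: B replaces A's per-element if/else double accumulator with a counting dict over the zipped pairs, summing the four transition-pair entries and deriving transversions as total minus transitions.
import Mathlib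
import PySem

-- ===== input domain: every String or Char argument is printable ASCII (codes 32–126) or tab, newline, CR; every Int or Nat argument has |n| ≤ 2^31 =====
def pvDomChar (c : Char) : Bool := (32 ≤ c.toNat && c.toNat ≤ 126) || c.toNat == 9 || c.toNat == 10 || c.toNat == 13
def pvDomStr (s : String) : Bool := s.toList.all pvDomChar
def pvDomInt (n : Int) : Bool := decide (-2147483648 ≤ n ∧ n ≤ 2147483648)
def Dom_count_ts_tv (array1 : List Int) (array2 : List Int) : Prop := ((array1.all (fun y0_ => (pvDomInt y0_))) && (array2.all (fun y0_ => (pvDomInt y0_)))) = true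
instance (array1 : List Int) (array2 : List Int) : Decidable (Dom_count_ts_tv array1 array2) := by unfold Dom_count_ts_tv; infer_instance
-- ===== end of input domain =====

-- B replaces A's per-element if/else counters with a counting dict over the zipped
-- pairs, summing the four transition-pair entries; transversions = total - transitions.

-- ===== PORT A =====
-- the frozenset of transition pairs (Allele values: A=1, C=2, G=4, T=8)
def tsPairs : PySem.Set (Int × Int) :=
  PySem.Set.ofList [(1, 4), (4, 1), (2, 8), (8, 2)]

def count_ts_tv (array1 : List Int) (array2 : List Int) : Int × Int :=
  (List.zip array1 array2).foldl
    (fun (s : Int × Int) pair =>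
      if pair ∈ tsPairs then (s.1 + 1, s.2) else (s.1, s.2 + 1))
    (0, 0)

-- ===== PORT B =====
def count_ts_tv_alt (array1 : List Int) (array2 : List Int) : Int × Int :=
  let counts : PySem.Dict (Int × Int) Int :=
    PySem.Dict.counter (List.zip array1 array2)
  let transitions : Int :=
    counts.getD (1, 4) 0 + counts.getD (4, 1) 0 + counts.getD (2, 8) 0 + counts.getD (8, 2) 0
  (transitions, (array1.length : Int) - transitions)

-- ===== PRECONDITION & SPEC =====
-- Pre_ excludes length-mismatched inputs, on which A's assert raises AssertionError.
def Pre_count_ts_tv (array1 : List Int) (array2 : List Int) : Prop :=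
  array1.length = array2.length
instance (array1 : List Int) (array2 : List Int) : Decidable (Pre_count_ts_tv array1 array2) := by unfold Pre_count_ts_tv; infer_instance

def pvWitness_count_ts_tv : List Int × List Int := ([1, 2, 8, 0], [4, 8, 8, 1])

def Spec_count_ts_tv (array1 : List Int) (array2 : List Int) (out : Int × Int) : Prop := out = count_ts_tv_alt array1 array2
instance (array1 : List Int) (array2 : List Int) (out : Int × Int) : Decidable (Spec_count_ts_tv array1 array2 out) := by unfold Spec_count_ts_tv; infer_instance

-- ===== CLAIM (what is proved, stated in full; the proofs are below) =====
def Claim_equal_count_ts_tv : Prop := ∀ (array1 : List Int) (array2 : List Int), Dom_count_ts_tv array1 array2 → Pre_count_ts_tv array1 array2 → Spec_count_ts_tv array1 array2 (count_ts_tv array1 array2)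

-- ===== LEMMAS AND PROOFS =====

lemma tsPairs_eq : tsPairs = [(1, 4), (4, 1), (2, 8), (8, 2)] := by decide

-- A's loop returns (countP membership, length - countP membership).
lemma loopA (z : List (Int × Int)) : ∀ t v : Int,
    z.foldl (fun (s : Int × Int) pair =>
        if pair ∈ tsPairs then (s.1 + 1, s.2) else (s.1, s.2 + 1)) (t, v)
      = (t + (z.countP (fun p => decide (p ∈ tsPairs)) : Int),
         v + ((z.length : Int) - (z.countP (fun p => decide (p ∈ tsPairs)) : Int))) := by
  induction z with
  | nil => intro t v; simp
  | cons a z ih =>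
    intro t v
    by_cases h : a ∈ tsPairs <;>
      simp [List.foldl_cons, h, ih, Prod.ext_iff] <;> omega

-- countP over the four-element pair set is the sum of the four counts.
lemma countP_four (z : List (Int × Int)) :
    (z.countP (fun p => decide (p ∈ tsPairs)) : Int)
      = (z.count ((1 : Int), (4 : Int)) : Int) + z.count (4, 1) + z.count (2, 8) + z.count (8, 2) := by
  have hp : (fun p : Int × Int => decide (p ∈ tsPairs))
      = fun p : Int × Int =>
          decide (p = (1, 4)) || (decide (p = (4, 1)) || (decide (p = (2, 8)) || decide (p = (8, 2)))) := by
    funext p; simp [tsPairs_eq]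
  rw [hp]
  induction z with
  | nil => simp
  | cons a z ih =>
    simp only [List.countP_cons, List.count_cons]
    by_cases h1 : a = (1, 4) <;> by_cases h2 : a = (4, 1) <;>
      by_cases h3 : a = (2, 8) <;> by_cases h4 : a = (8, 2) <;>
      simp [h1, h2, h3, h4] <;> omega

-- ===== VERDICT (by name: the statement is the Claim_ definition above) =====
theorem count_ts_tv_spec : Claim_equal_count_ts_tv := by
  intro a1 a2 _ hpre
  unfold Spec_count_ts_tv count_ts_tv count_ts_tv_alt
  rw [loopA]
  have hlen : (List.zip a1 a2).length = a1.length := by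
    rw [List.length_zip, hpre, min_self]
  simp [PySem.Dict.getD_counter, countP_four, hlen]
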